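/- GENERATED by tools/from_farm_form.py from prooffarm-gif/accepted/DGifDecompressLine.7/Proof.lean (a worked proof of the farm's unit `DGifDecompressLine.7`,
   accepted by the verdict) — do not edit. -/
import Gif.Spec.Units.DGifDecompressLine_7
import Gif.Spec.AllSegs

open X86 X86.User Asan ProgX.Base ProgX.Base.Spec Gif.Spec

set_option maxRecDepth 4000
set_option maxHeartbeats 4000000

/-- Segment 7 of `DGifDecompressLine` (106D06H … 106D47H; l.923-933): from `Traced` (`r12d` = CrntCode ≤ 4095), the checked load
`Prefix[CrntCode]` — inside `Prefix[4096]` —; the code is defined: `i` and `Private` spilled, `r15d = ClearCode`, the head of the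
trace loop (`Trace`, `k = 4095`); undefined: the checked load of `Private->RunningCode`, then one of the two arms of l.932 (`Mid`). -/
theorem Gif.Spec.Proved.DGifDecompressLine_7_ok : Gif.Spec.DGifDecompressLine_7.Statement := by
  intro Lay hLay μ hμ u₀ hcode h_load4 H rest frames F R n m e ret v hat
  obtain ⟨⟨⟨hbody, hloc, h_r14, h_r13, h_rbx, h_rbp, h_w1⟩, h_lt, h_sp0, h_mu⟩, h_r12⟩ := hat
  -- 1. THE PRELUDE (the same in every segment of this function; Gif/Spec/LzwCarry.lean §2)
  have he := hbody.entry
  v_entry he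
  have hgin := hbody.gif_inside
  have hpin := hbody.pv_inside
  have hn31 : n < 2 ^ 31 := hbody.len_lt
  have w_rip := hbody.rip
  have c_rsp : v.reg .rsp = e.reg .rsp - 200 := hbody.rsp
  have w_eq : Mem.EqOn ProgX.Base.L.textLo ProgX.Base.L.textHi u₀.mem v.mem := ProgX.Base.conv_code_eqOn hbody.code
  have hdf : v.flags .df = false := (show abiInv _ from hbody.abi).1
  have hmx : v.mxcsr &&& 0x1F80 = 0x1F80 := (show abiInv _ from hbody.abi).2
  have hsse := ProgX.Base.sseOK_of_abiInv hbody.abi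
  have w_kept : RegsKept [.rsp] v v := RegsKept.refl _ _
  -- 2. THE REGISTERS AND SLOTS THE SEGMENT READS
  have hc31 : (v.reg .r12).toNat < 2 ^ 31 := by omega
  obtain ⟨cc, k_cc⟩ : ∃ cc, v.mem.readLE (e.reg .rsp - 184) 4 = cc := ⟨_, rfl⟩
  -- 3. THE WALK
  u_walk hcode [hμ.vendor, Gif.Spec.sext32_small (v.reg .r12) hc31]
    until [Gif.L.DGifDecompressLine.at_106e4b, Gif.L.DGifDecompressLine.at_106da7, Gif.L.DGifDecompressLine.at_106d47]
    span [ProgX.Base.L.textLo, ProgX.Base.L.textHi] side (v_side)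
  -- 4. THE CHECK GOALS: the object is live, the access lies inside it
  case check_106d11 =>
    -- l.923 `Prefix[CrntCode]`: inside `Prefix[4096]` (`CrntCode ≤ 4095`)
    have hun : ShadowUntouched v.mem s_106d11.mem := by v_untouched
    have hl := prefixLive hbody.ok.pv_live rest (DGifDecompressLine.framesIn frames e) (v.reg .r12).toNat (by omega)
    simp only [gfield] at hl
    exact hl.accSmall hbody.inv.shadow hun _ 4 (by decide) (by u_omega) (by u_omega)
  case check_106d36 =>
    -- l.933 `Private->RunningCode`: a field of pv
    have hun : ShadowUntouched v.mem s_106d36.mem := by v_untouched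
    have hl : LiveIn (H.liveObjs ++ rest) (DGifDecompressLine.framesIn frames e) F.pv 24936 :=
      hbody.ok.pv_live.liveIn rest _ (Nat.le_refl _) (Nat.le_refl _)
    exact hl.accSmall hbody.inv.shadow hun _ 4 (by decide) (by u_omega) (by u_omega)
  -- 5. THE EXITS: `Body` through the segment's stores by `Body.carry`, then the clauses of the exit's assertion one by one
  · -- 0x106da7 (l.934: `CrntCode == RunningCode - 2`): `Mid`; only the return address of the checks was stored
    have hun : ShadowUntouched v.mem s_106d45.mem := by v_untouched
    have hsame : Mem.SameExcept [⟨(e.reg .rsp).toNat - 208, (e.reg .rsp).toNat - 200⟩] v.mem s_106d45.mem := by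
      rw [w_mem]
      u_same
    have habi : (conv u₀).inv s_106d45 := by v_inv
    obtain ⟨k_body, k_loc, k_mu, k_clear, k_eof⟩ :=
      hbody.carry (cut' := Gif.L.DGifDecompressLine.at_106da7) w_rip w_rsp w_eq habi hun hsame (by dl_scratch)
    refine ReachVia.done (Or.inr (Or.inl ⟨⟨k_body, k_loc hloc, ?_, ?_, ?_, ?_, ?_⟩, ?_, ?_, ?_⟩))
    · rw [w_kept .r14 rfl]
      exact h_r14
    · rw [w_kept .r13 rfl]
      exact h_r13
    · rw [w_kept .rbx rfl]
      exact h_rbx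
    · rw [w_kept .rbp rfl]
      exact h_rbp
    · rw [w_kept .rbp rfl, w_kept .rbx rfl]
      exact h_w1
    · rw [w_kept .rbp rfl]
      exact h_lt
    · rw [w_kept .rbx rfl]
      exact h_sp0
    · rw [k_mu]
      exact h_mu
  · -- 0x106d47 (l.940: the undefined code is accepted): `Mid`; only the return address of the checks was stored
    have hun : ShadowUntouched v.mem s_106d45.mem := by v_untouched
    have hsame : Mem.SameExcept [⟨(e.reg .rsp).toNat - 208, (e.reg .rsp).toNat - 200⟩] v.mem s_106d45.mem := by
      rw [w_mem]
      u_same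
    have habi : (conv u₀).inv s_106d45 := by v_inv
    obtain ⟨k_body, k_loc, k_mu, k_clear, k_eof⟩ :=
      hbody.carry (cut' := Gif.L.DGifDecompressLine.at_106d47) w_rip w_rsp w_eq habi hun hsame (by dl_scratch)
    refine ReachVia.done (Or.inr (Or.inr ⟨⟨k_body, k_loc hloc, ?_, ?_, ?_, ?_, ?_⟩, ?_, ?_, ?_⟩))
    · rw [w_kept .r14 rfl]
      exact h_r14
    · rw [w_kept .r13 rfl]
      exact h_r13
    · rw [w_kept .rbx rfl]
      exact h_rbx
    · rw [w_kept .rbp rfl]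
      exact h_rbp
    · rw [w_kept .rbp rfl, w_kept .rbx rfl]
      exact h_w1
    · rw [w_kept .rbp rfl]
      exact h_lt
    · rw [w_kept .rbx rfl]
      exact h_sp0
    · rw [k_mu]
      exact h_mu
  · -- 0x106e4b (l.955): the code is defined: the head of the trace loop, `Trace` with `StackPtr = 0`, `k = 4095`
    -- the values the two spills stored, as numbers
    have e_i : (Word.part .w32 (v.reg .rbp)).toNat = (v.reg .rbp).toNat := by
      rw [ProgX.toNat_part32]
      exact Nat.mod_eq_of_lt (by omega)
    rw [e_i, h_r14] at w_mem
    -- what was stored: the return address of the check, the two spill slots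
    have hun : ShadowUntouched v.mem s_106d2d.mem := by v_untouched
    have hsame : Mem.SameExcept [⟨(e.reg .rsp).toNat - 208, (e.reg .rsp).toNat - 200⟩,
        ⟨(e.reg .rsp).toNat - 144, (e.reg .rsp).toNat - 128⟩] v.mem s_106d2d.mem := by
      rw [w_mem]
      u_same
    have habi : (conv u₀).inv s_106d2d := by v_inv
    obtain ⟨k_body, k_loc, k_mu, k_clear, k_eof⟩ :=
      hbody.carry (cut' := Gif.L.DGifDecompressLine.at_106e4b) w_rip w_rsp w_eq habi hun hsame (by dl_scratch)
    -- ClearCode ≤ 256 [LZ2]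
    have hclear := hbody.lz.clear
    have k_cl : cc = GifFilePrivateType.ClearCode v.mem F.pv := k_cc.symm.trans hloc.s_clear
    refine ReachVia.done (Or.inl ⟨4095, k_body, k_loc hloc, ?_, ?_, ?_, ?_, ?_, ?_⟩)
    · rw [w_kept .r13 rfl]
      exact h_r13
    · -- `r15d = ClearCode`, loaded from its slot
      rw [w_r15, k_clear, Gif.Spec.toNat_ofBV_ofNat32 cc (by omega)]
      exact k_cl
    · -- StackPtr = 0
      rw [w_kept .rbx rfl]
      omega
    · -- `i` spilled to [rsp+38H]
      have k_i : s_106d2d.mem.readLE (e.reg .rsp - 144) 4 = (v.reg .rbp).toNat := by u_read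
      rw [k_i]
      exact h_lt
    · -- `Private` spilled to [rsp+40H]
      u_read
    · -- the measure: no store of the segment touched it
      rw [k_mu]
      exact h_mu
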